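-- pv_equiv track=rewrite | github.com/greatertomi/problem-solving | codility-challenges/replacing-books.py | replacingBooks
-- ===== SOURCE A (Python) =====
-- def calculateReplacement(arr, k):
--     count = 0
--     for num in range(arr[0], arr[-1] + 1):
--         if num in arr:
--             count += 1
--         elif num not in arr and k > 0:
--             count += 1
--             k -= 1
--         else:
--             break
--     if k > 0:
--         count += k
--     return count
--
-- def replacingBooks(arr, k):
--     value_dict = {}
--     for i in range(len(arr)):
--         if arr[i] in value_dict:
--             value_dict[arr[i]].append(i)
--         else:
--             value_dict[arr[i]] = [i]
--     dist = [calculateReplacement(x, k) for x in value_dict.values()]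
--     return max(dist)
-- ===== SOURCE B (Python) =====
-- def replacingBooks(arr, k):
--     # Group positions of each value, then compute each group's answer by a
--     # single walk over the gaps between consecutive positions instead of
--     # scanning the whole index span with repeated membership tests.
--     groups = {}
--     for i, v in enumerate(arr):
--         groups.setdefault(v, []).append(i)
--     best = None
--     for idxs in groups.values():
--         r = max(k, 0)      # usable replacement budget
--         count = 1
--         stopped = False
--         for prev, nxt in zip(idxs, idxs[1:]):
--             g = nxt - prev - 1
--             if g <= r:
--                 count += g + 1
--                 r -= g
--             else:
--                 count += r
--                 stopped = True
--                 break
--         if not stopped: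
--             count += r
--         if best is None or count > best:
--             best = count
--     return best
-- ===== Notes on version B (the rewrite author's own statement) =====
-- stated objective: faster
-- what changed: Per value group, instead of scanning every integer in the index span and testing membership with 'num in arr' (a linear scan per step), B walks the sorted index list once and subtracts each gap from the replacement budget.
import Mathlib
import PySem

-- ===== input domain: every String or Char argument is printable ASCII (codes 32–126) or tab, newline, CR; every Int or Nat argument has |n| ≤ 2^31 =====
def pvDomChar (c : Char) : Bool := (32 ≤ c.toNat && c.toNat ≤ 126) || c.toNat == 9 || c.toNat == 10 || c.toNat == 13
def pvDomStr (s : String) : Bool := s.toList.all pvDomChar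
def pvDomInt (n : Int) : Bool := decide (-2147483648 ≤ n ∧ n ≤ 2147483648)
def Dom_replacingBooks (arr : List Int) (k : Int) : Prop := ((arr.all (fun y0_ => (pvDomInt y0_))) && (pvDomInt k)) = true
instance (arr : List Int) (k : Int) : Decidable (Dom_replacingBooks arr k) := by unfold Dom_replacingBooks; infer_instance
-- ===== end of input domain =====

-- B replaces A's per-group scan over the whole index span (with an O(n) membership
-- test per step) by a single walk over the group's sorted index list, subtracting each
-- gap from the replacement budget: an asymptotically faster exact re-implementation.

-- ===== PORT A =====
-- the 'if k > 0: count += k' epilogue of calculateReplacement (runs after the loop, also after a break)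
def calcPost (k count : Int) : Int := if k > 0 then count + k else count

-- the 'for num in range(arr[0], arr[-1] + 1)' loop of calculateReplacement
def calcLoop (arr : List Int) : List Int → Int → Int → Int
  | [], k, count => calcPost k count
  | num :: rest, k, count =>
    if arr.contains num then calcLoop arr rest k (count + 1)
    else if k > 0 then calcLoop arr rest (k - 1) (count + 1)
    else calcPost k count    -- break, then the epilogue

-- calculateReplacement is only ever called on nonempty lists (dict group values), so
-- arr[0] / arr[-1] never raise; the .getD 0 inside pyGetD is unreachable there.
def calculateReplacement (arr : List Int) (k : Int) : Int :=
  calcLoop arr (PySem.List.pyRange (PySem.List.pyGetD arr 0 0) (PySem.List.pyGetD arr (-1) 0 + 1) 1) k 0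

def replacingBooks (arr : List Int) (k : Int) : Int :=
  let value_dict : PySem.Dict Int (List Int) :=
    (PySem.List.pyRange 0 (PySem.List.len arr) 1).foldl
      (fun d i =>
        match d.get? (PySem.List.pyGetD arr i 0) with
        | some l => d.insert (PySem.List.pyGetD arr i 0) (l ++ [i])
        | none   => d.insert (PySem.List.pyGetD arr i 0) [i])
      PySem.Dict.empty
  let dist := value_dict.values.map (fun x => calculateReplacement x k)
  (PySem.List.max? dist (fun x => x)).getD 0   -- max([]) raises in Python: Pre_ excludes arr = []

-- ===== PORT B =====
-- the 'for prev, nxt in zip(idxs, idxs[1:])' loop of B, over the gaps of a group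
def windowLoop : Int → List Int → Int → Int → Int
  | _, [], r, count => count + r                 -- 'if not stopped: count += r'
  | prev, nxt :: rest, r, count =>
    if nxt - prev - 1 ≤ r then
      windowLoop nxt rest (r - (nxt - prev - 1)) (count + (nxt - prev - 1) + 1)
    else count + r                               -- 'count += r; break'

def windowGroup (idxs : List Int) (k : Int) : Int :=
  match idxs with
  | [] => 0                                      -- unreachable: dict groups are nonempty
  | a :: rest => windowLoop a rest (max k 0) 1   -- 'r = max(k, 0); count = 1'

def replacingBooks_alt (arr : List Int) (k : Int) : Int :=
  let groups : PySem.Dict Int (List Int) :=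
    (PySem.List.enumerate arr).foldl (fun d p => d.modify p.2 [] (fun l => l ++ [p.1])) PySem.Dict.empty
  (groups.values.foldl
    (fun best idxs =>
      let count := windowGroup idxs k
      match best with
      | none => some count
      | some b => if count > b then some count else some b)
    none).getD 0   -- 'none' (Python's None) only for arr = [], excluded by Pre_

-- ===== PRECONDITION & SPEC =====
-- Python A raises ValueError (max of an empty sequence) on arr = []; nothing else raises.
def Pre_replacingBooks (arr : List Int) (k : Int) : Prop := arr ≠ []
instance (arr : List Int) (k : Int) : Decidable (Pre_replacingBooks arr k) := by unfold Pre_replacingBooks; infer_instance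
def pvWitness_replacingBooks : List Int × Int := ([1, 3, 2, 1], 2)

def Spec_replacingBooks (arr : List Int) (k : Int) (out : Int) : Prop := out = replacingBooks_alt arr k
instance (arr : List Int) (k : Int) (out : Int) : Decidable (Spec_replacingBooks arr k out) := by unfold Spec_replacingBooks; infer_instance

-- ===== CLAIM (what is proved, stated in full; the proofs are below) =====
def Claim_equal_replacingBooks : Prop := ∀ (arr : List Int) (k : Int), Dom_replacingBooks arr k → Pre_replacingBooks arr k → Spec_replacingBooks arr k (replacingBooks arr k)

-- ===== LEMMAS AND PROOFS =====

-- the canonical grouping dict (index lists per value) both ports build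
def pvGroups (arr : List Int) : PySem.Dict Int (List Int) :=
  (PySem.List.enumerate arr).foldl (fun d p => d.modify p.2 [] (fun l => l ++ [p.1])) PySem.Dict.empty

-- the list of positions of v in arr, in order
def pvIdxList (arr : List Int) (v : Int) : List Int :=
  ((PySem.List.enumerate arr).filter (fun p => p.2 == v)).map (fun p => p.1)

lemma dictA_eq (arr : List Int) :
    (PySem.List.pyRange 0 (PySem.List.len arr) 1).foldl
      (fun d i =>
        match d.get? (PySem.List.pyGetD arr i 0) with
        | some l => d.insert (PySem.List.pyGetD arr i 0) (l ++ [i])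
        | none   => d.insert (PySem.List.pyGetD arr i 0) [i])
      PySem.Dict.empty = pvGroups arr := by
  unfold pvGroups
  rw [PySem.List.enumerate_eq_map_pyRange arr 0, List.foldl_map]
  have hstep : (fun (d : PySem.Dict Int (List Int)) (i : Int) =>
      match d.get? (PySem.List.pyGetD arr i 0) with
      | some l => d.insert (PySem.List.pyGetD arr i 0) (l ++ [i])
      | none   => d.insert (PySem.List.pyGetD arr i 0) [i]) =
      (fun (d : PySem.Dict Int (List Int)) (j : Int) =>
        d.modify ((j, PySem.List.pyGetD arr j 0)).2 [] (fun l => l ++ [((j, PySem.List.pyGetD arr j 0)).1])) := by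
    funext d i
    rcases h : d.get? (PySem.List.pyGetD arr i 0) with _ | l <;>
      simp [PySem.Dict.modify, PySem.Dict.getD_eq_get?_getD, h]
  rw [hstep]

lemma keys_pvGroups (arr : List Int) : (pvGroups arr).keys = PySem.Set.ofList arr := by
  unfold pvGroups
  rw [PySem.Dict.keys_foldl_modify_key (PySem.List.enumerate arr) (fun p => p.2) []
        (fun _ p => fun l => l ++ [p.1]) PySem.Dict.empty]
  rw [PySem.Dict.keys_empty, PySem.List.map_snd_enumerate]
  rfl

lemma nodup_keys_pvGroups (arr : List Int) : (pvGroups arr).keys.Nodup := by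
  unfold pvGroups
  exact PySem.Dict.nodup_keys_foldl_modify_key (PySem.List.enumerate arr) (fun p => p.2) []
    (fun _ p => fun l => l ++ [p.1]) PySem.Dict.empty (by rw [PySem.Dict.keys_empty]; exact List.nodup_nil)

lemma getD_pvGroups (arr : List Int) (v : Int) : (pvGroups arr).getD v [] = pvIdxList arr v := by
  unfold pvGroups pvIdxList
  rw [show (PySem.List.enumerate arr).foldl
        (fun (d : PySem.Dict Int (List Int)) p => d.modify p.2 [] (fun l => l ++ [p.1])) PySem.Dict.empty
      = ((PySem.List.enumerate arr).map (fun p => (p.2, p.1))).foldl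
        (fun (d : PySem.Dict Int (List Int)) q => d.modify q.1 [] (fun l => l ++ [q.2])) PySem.Dict.empty
      from by rw [List.foldl_map]]
  rw [PySem.Dict.getD_foldl_modify_append]
  simp [List.filter_map, Function.comp_def]

lemma pairwise_pvIdxList (arr : List Int) (v : Int) : (pvIdxList arr v).Pairwise (· < ·) := by
  unfold pvIdxList
  exact List.pairwise_map.2 ((PySem.List.pairwise_lt_enumerate arr 0).filter _)

lemma pvIdxList_ne_nil (arr : List Int) (v : Int) (hv : v ∈ arr) : pvIdxList arr v ≠ [] := by
  obtain ⟨n, hn, hnv⟩ := List.mem_iff_getElem.1 hv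
  apply List.ne_nil_of_mem (a := (n : Int))
  unfold pvIdxList
  refine List.mem_map.2 ⟨((n : Int), arr[n]), List.mem_filter.2 ⟨?_, by simp [hnv]⟩, rfl⟩
  exact (PySem.List.mem_enumerate_iff arr 0 _).2 ⟨n, hn, by simp⟩

lemma values_pvGroups (arr : List Int) :
    (pvGroups arr).values = (PySem.Set.ofList arr).map (fun v => pvIdxList arr v) := by
  rw [PySem.Dict.values_eq_map_keys _ (nodup_keys_pvGroups arr) [], keys_pvGroups]
  exact List.map_congr_left (fun v _ => getD_pvGroups arr v)

lemma calcLoop_nonpos (L : List Int) (nums : List Int) :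
    ∀ (k count : Int), k ≤ 0 → calcLoop L nums k count = calcLoop L nums 0 count := by
  induction nums with
  | nil => intro k count hk; simp only [calcLoop, calcPost]; split_ifs <;> omega
  | cons n rest ih =>
    intro k count hk
    simp only [calcLoop]
    by_cases hc : L.contains n
    · simp only [hc, if_true]; exact ih k (count + 1) hk
    · simp only [hc, Bool.false_eq_true, if_false]
      have h1 : ¬ k > 0 := by omega
      have h2 : ¬ (0 : Int) > 0 := by omega
      simp only [h1, h2, if_false, calcPost]

lemma calcLoop_gap (L : List Int) (nxt last : Int) (hnl : nxt ≤ last) :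
    ∀ (g : Nat) (x k count : Int), 0 ≤ k → x + g = nxt →
      (∀ m : Int, x ≤ m → m < nxt → L.contains m = false) →
      calcLoop L (PySem.List.pyRange x (last + 1) 1) k count =
        if (g : Int) ≤ k then calcLoop L (PySem.List.pyRange nxt (last + 1) 1) (k - g) (count + g)
        else count + k := by
  intro g
  induction g with
  | zero =>
    intro x k count hk hx _
    have hxn : x = nxt := by push_cast at hx; omega
    subst hxn
    rw [if_pos (by exact_mod_cast hk)]
    norm_num
  | succ g ih =>
    intro x k count hk hx hnot
    have hxn : x < nxt := by push_cast at hx; omega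
    have hxl : x < last + 1 := by omega
    rw [PySem.List.pyRange_one_cons hxl]
    have hcx : L.contains x = false := hnot x le_rfl hxn
    simp only [calcLoop, hcx, Bool.false_eq_true, if_false]
    by_cases hk0 : k > 0
    · rw [if_pos hk0,
        ih (x + 1) (k - 1) (count + 1) (by omega) (by push_cast at hx ⊢; omega)
          (fun m h1 h2 => hnot m (by omega) h2)]
      by_cases hgk : (g : Int) ≤ k - 1
      · rw [if_pos hgk, if_pos (by push_cast; omega)]
        have e1 : k - 1 - (g : Int) = k - ((g : Nat) + 1 : Nat) := by push_cast; ring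
        have e2 : count + 1 + (g : Int) = count + ((g : Nat) + 1 : Nat) := by push_cast; ring
        rw [e1, e2]
      · rw [if_neg hgk, if_neg (by push_cast; omega)]
        omega
    · rw [if_neg hk0]
      have hkz : k = 0 := by omega
      subst hkz
      rw [if_neg (by push_cast; omega)]
      simp [calcPost]

lemma le_getLast_of_pairwise (a : Int) (t : List Int) (h : (a :: t).Pairwise (· < ·)) :
    a ≤ (a :: t).getLast (List.cons_ne_nil a t) := by
  have hm := List.getLast_mem (List.cons_ne_nil a t)
  rcases List.mem_cons.1 hm with he | ht
  · omega
  · exact le_of_lt ((List.pairwise_cons.1 h).1 _ ht)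

lemma contains_eq_false_of_not_mem (L : List Int) (m : Int) (h : m ∉ L) : L.contains m = false := by
  cases hc : L.contains m
  · rfl
  · exact absurd (List.contains_iff_mem.1 hc) h

lemma calcLoop_main (L : List Int) (hL : L.Pairwise (· < ·)) :
    ∀ (rest : List Int) (prev k count : Int), 0 ≤ k → (prev :: rest) <:+ L →
      calcLoop L (PySem.List.pyRange prev ((prev :: rest).getLast (List.cons_ne_nil prev rest) + 1) 1) k count
        = windowLoop prev rest k (count + 1) := by
  intro rest
  induction rest with
  | nil =>
    intro prev k count hk hsuf
    have hmem : prev ∈ L := hsuf.subset (List.mem_cons_self)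
    rw [List.getLast_singleton, PySem.List.pyRange_one_singleton]
    simp only [calcLoop, List.contains_iff_mem.2 hmem, if_true, windowLoop, calcPost]
    split_ifs <;> omega
  | cons nxt rest' ih =>
    intro prev k count hk hsuf
    obtain ⟨s, hs⟩ := hsuf
    have hsub : (prev :: nxt :: rest').Pairwise (· < ·) := by
      have h' := hL
      rw [← hs] at h'
      exact (List.pairwise_append.1 h').2.1
    have hpn : prev < nxt := (List.pairwise_cons.1 hsub).1 nxt (by simp)
    have hsub2 : (nxt :: rest').Pairwise (· < ·) := (List.pairwise_cons.1 hsub).2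
    have hnl : nxt ≤ (nxt :: rest').getLast (List.cons_ne_nil nxt rest') :=
      le_getLast_of_pairwise nxt rest' hsub2
    rw [List.getLast_cons (List.cons_ne_nil nxt rest')]
    set last := (nxt :: rest').getLast (List.cons_ne_nil nxt rest') with hlastdef
    have hpl : prev < last + 1 := by omega
    rw [PySem.List.pyRange_one_cons hpl]
    have hmem : prev ∈ L := by rw [← hs]; simp
    simp only [calcLoop, List.contains_iff_mem.2 hmem, if_true]
    have hnot : ∀ m : Int, prev + 1 ≤ m → m < nxt → L.contains m = false := by
      intro m h1 h2
      apply contains_eq_false_of_not_mem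
      intro hmL
      rw [← hs] at hmL
      rcases List.mem_append.1 hmL with hpre | hsuf2
      · have h' := hL
        rw [← hs] at h'
        have := (List.pairwise_append.1 h').2.2 m hpre prev (by simp)
        omega
      · rcases List.mem_cons.1 hsuf2 with h3 | h4
        · omega
        · rcases List.mem_cons.1 h4 with h5 | h6
          · omega
          · have := (List.pairwise_cons.1 hsub2).1 m h6
            omega
    rw [calcLoop_gap L nxt last hnl (nxt - (prev + 1)).toNat (prev + 1) k (count + 1) hk
          (by omega) hnot]
    have hg : ((nxt - (prev + 1)).toNat : Int) = nxt - prev - 1 := by omega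
    rw [hg]
    simp only [windowLoop]
    by_cases hgk : nxt - prev - 1 ≤ k
    · rw [if_pos hgk, if_pos hgk]
      rw [ih nxt (k - (nxt - prev - 1)) (count + 1 + (nxt - prev - 1)) (by omega)
            ⟨s ++ [prev], by rw [← hs]; simp⟩]
    · rw [if_neg hgk, if_neg hgk]

lemma calc_eq_window (l : List Int) (hl : l.Pairwise (· < ·)) (hne : l ≠ []) (k : Int) :
    calculateReplacement l k = windowGroup l k := by
  obtain ⟨a, rest, rfl⟩ := List.exists_cons_of_ne_nil hne
  unfold calculateReplacement windowGroup
  have h0 : PySem.List.pyGetD (a :: rest) 0 0 = a := by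
    simp [PySem.List.pyGetD, PySem.List.pyGet?, PySem.List.pyIdx?]
  have hlast : PySem.List.pyGetD (a :: rest) (-1) 0 = (a :: rest).getLast (List.cons_ne_nil a rest) := by
    simp [PySem.List.pyGetD, PySem.List.pyGet?, PySem.List.pyIdx?, List.getLast_eq_getElem]
    rfl
  rw [h0, hlast]
  by_cases hk : 0 ≤ k
  · rw [calcLoop_main (a :: rest) hl rest a k 0 hk ⟨[], rfl⟩, max_eq_left hk]
    norm_num
  · rw [calcLoop_nonpos (a :: rest) _ k 0 (by omega),
      calcLoop_main (a :: rest) hl rest a 0 0 le_rfl ⟨[], rfl⟩, max_eq_right (by omega)]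
    norm_num

lemma best_eq_max (k : Int) (l : List (List Int)) :
    l.foldl
      (fun best idxs =>
        let count := windowGroup idxs k
        match best with
        | none => some count
        | some b => if count > b then some count else some b)
      none = PySem.List.max? (l.map (fun x => windowGroup x k)) (fun y => y) := by
  unfold PySem.List.max?
  rw [List.foldl_map]
  apply PySem.List.foldl_congr_mem
  intro acc x _
  cases acc <;> simp [gt_iff_lt]

-- ===== VERDICT (by name: the statement is the Claim_ definition above) =====
theorem replacingBooks_spec : Claim_equal_replacingBooks := by
  unfold Claim_equal_replacingBooks
  intro arr k _ hpre
  unfold Spec_replacingBooks replacingBooks replacingBooks_alt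
  simp only []
  rw [dictA_eq arr, best_eq_max k,
    show (List.foldl (fun (d : PySem.Dict Int (List Int)) p => d.modify p.2 [] fun l => l ++ [p.1])
        PySem.Dict.empty (PySem.List.enumerate arr)) = pvGroups arr from rfl,
    values_pvGroups arr]
  simp only [List.map_map]
  have hmaps : List.map ((fun x => calculateReplacement x k) ∘ fun v => pvIdxList arr v) (PySem.Set.ofList arr)
      = List.map ((fun x => windowGroup x k) ∘ fun v => pvIdxList arr v) (PySem.Set.ofList arr) := by
    apply List.map_congr_left
    intro v hv
    have hva : v ∈ arr := (PySem.Set.mem_ofList arr v).1 hv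
    exact calc_eq_window (pvIdxList arr v) (pairwise_pvIdxList arr v) (pvIdxList_ne_nil arr v hva) k
  rw [hmaps]
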